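-- pv_equiv track=rewrite | github.com/niinasaarelainen/omat-python-projektit2020 | advent calender2015/07/SSL_b.py | tutki
-- ===== SOURCE A (Python) =====
-- def tutki(ulkona_array, hypernet_array):
--
--     hypers = []
--
--     for hypernet in hypernet_array:
--         for i in range(len(hypernet)-2):
--             if(hypernet[i] == hypernet[i+2] and hypernet[i] != hypernet[i+1]):
--                 hypers.append(hypernet[i] + hypernet[i+1] + hypernet[i+2])
--
--     for ulkona in  ulkona_array:
--         for hyper in hypers:
--             hyper = hyper[1] + hyper[0] + hyper[1]
--             if hyper in ulkona:
--                 return 1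
--
--     return 0
-- ===== SOURCE B (Python) =====
-- def tutki(ulkona_array, hypernet_array):
--     babs = set()
--     for h in hypernet_array:
--         for a, b, c in zip(h, h[1:], h[2:]):
--             if a == c and a != b:
--                 babs.add((b, a, b))
--     for u in ulkona_array:
--         for t in zip(u, u[1:], u[2:]):
--             if t in babs:
--                 return 1
--     return 0
-- ===== Notes on version B (the rewrite author's own statement) =====
-- stated objective: faster
-- what changed: B collects the reversed BAB triples into a hash set once and slides a 3-char window over each ulkona string testing set membership, instead of A's substring search of every collected pattern inside every ulkona string.
import Mathlib
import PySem

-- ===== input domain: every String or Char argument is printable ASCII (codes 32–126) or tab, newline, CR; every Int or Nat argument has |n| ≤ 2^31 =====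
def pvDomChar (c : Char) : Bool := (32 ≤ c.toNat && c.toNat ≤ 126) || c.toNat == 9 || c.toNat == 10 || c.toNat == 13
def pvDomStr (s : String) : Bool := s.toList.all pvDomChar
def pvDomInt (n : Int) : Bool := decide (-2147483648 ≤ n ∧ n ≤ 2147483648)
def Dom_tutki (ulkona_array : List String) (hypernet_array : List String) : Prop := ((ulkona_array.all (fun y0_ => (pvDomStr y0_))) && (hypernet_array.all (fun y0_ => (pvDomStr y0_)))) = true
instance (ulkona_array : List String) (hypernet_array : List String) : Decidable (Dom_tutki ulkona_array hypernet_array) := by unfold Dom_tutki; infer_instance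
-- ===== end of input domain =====

-- B replaces A's "every collected ABA pattern substring-searched inside every ulkona string" by a
-- hash set of the derived BAB triples plus one 3-char sliding window per ulkona string (objective: faster).

-- ===== PORT A =====
-- A's second loop nest with its early 'return 1' (the inner 'for hyper in hypers: if …: return 1'
-- is the list-any of its test).
def tutkiSearchA : List String → List (List Char) → Int
  | [], _ => 0
  | u :: rest, hypers =>
    if hypers.any (fun hyp =>
        PySem.Chars.isIn
          [PySem.List.pyGetD hyp 1 ' ', PySem.List.pyGetD hyp 0 ' ', PySem.List.pyGetD hyp 1 ' ']
          u.toList)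
    then 1 else tutkiSearchA rest hypers

def tutki (ulkona_array : List String) (hypernet_array : List String) : Int :=
  let hypers : List (List Char) :=
    hypernet_array.foldl (fun acc h =>
      let l := h.toList
      (PySem.List.pyRange 0 ((l.length : Int) - 2) 1).foldl (fun acc i =>
        if PySem.List.pyGetD l i ' ' == PySem.List.pyGetD l (i + 2) ' ' &&
           PySem.List.pyGetD l i ' ' != PySem.List.pyGetD l (i + 1) ' '
        then acc ++ [[PySem.List.pyGetD l i ' ', PySem.List.pyGetD l (i + 1) ' ',
                      PySem.List.pyGetD l (i + 2) ' ']]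
        else acc) acc) []
  tutkiSearchA ulkona_array hypers

-- ===== PORT B =====
-- zip(s, s[1:], s[2:]): the consecutive 3-char windows of a string.
def pvTrips : List Char → List (Char × Char × Char)
  | a :: b :: c :: t => (a, b, c) :: pvTrips (b :: c :: t)
  | _ => []

-- B's second loop with its early 'return 1'.
def tutkiSearchB : List String → PySem.Set (Char × Char × Char) → Int
  | [], _ => 0
  | u :: rest, babs =>
    if (pvTrips u.toList).any (fun t => PySem.Set.contains babs t)
    then 1 else tutkiSearchB rest babs

def tutki_alt (ulkona_array : List String) (hypernet_array : List String) : Int :=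
  let babs : PySem.Set (Char × Char × Char) :=
    hypernet_array.foldl (fun s h =>
      (pvTrips h.toList).foldl (fun s t =>
        if t.1 == t.2.2 && t.1 != t.2.1 then PySem.Set.add s (t.2.1, t.1, t.2.1) else s) s)
      PySem.Set.empty
  tutkiSearchB ulkona_array babs

-- ===== PRECONDITION & SPEC =====
def Spec_tutki (ulkona_array : List String) (hypernet_array : List String) (out : Int) : Prop := out = tutki_alt ulkona_array hypernet_array
instance (ulkona_array : List String) (hypernet_array : List String) (out : Int) : Decidable (Spec_tutki ulkona_array hypernet_array out) := by unfold Spec_tutki; infer_instance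

-- ===== CLAIM (what is proved, stated in full; the proofs are below) =====
def Claim_equal_tutki : Prop := ∀ (ulkona_array : List String) (hypernet_array : List String), Dom_tutki ulkona_array hypernet_array → Spec_tutki ulkona_array hypernet_array (tutki ulkona_array hypernet_array)

-- ===== LEMMAS AND PROOFS =====

-- window membership ↔ length-3 infix
theorem mem_pvTrips_iff_infix (l : List Char) (x y z : Char) :
    (x, y, z) ∈ pvTrips l ↔ [x, y, z] <:+: l := by
  induction l using pvTrips.induct with
  | case1 a b c t ih =>
    simp only [pvTrips, List.mem_cons, ih, List.infix_cons_iff, List.cons_prefix_cons,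
      List.nil_prefix, and_true, Prod.mk.injEq]
  | case2 l h =>
    constructor
    · intro hm
      match l, h with
      | [], _ => exact absurd hm (List.not_mem_nil)
      | [a], _ => exact absurd hm (List.not_mem_nil)
      | [a, b], _ => exact absurd hm (List.not_mem_nil)
      | a :: b :: c :: t, h => exact absurd rfl (h a b c t)
    · intro hinf
      exfalso
      have hl := hinf.length_le
      match l, h with
      | [], _ => simp at hl
      | [a], _ => simp at hl
      | [a, b], _ => simp at hl
      | a :: b :: c :: t, h => exact h a b c t rfl

-- window membership ↔ index characterization
theorem mem_pvTrips_iff_getElem (l : List Char) (x y z : Char) :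
    (x, y, z) ∈ pvTrips l ↔
      ∃ k : Nat, l[k]? = some x ∧ l[k + 1]? = some y ∧ l[k + 2]? = some z := by
  induction l using pvTrips.induct with
  | case1 a b c t ih =>
    simp only [pvTrips, List.mem_cons, ih, Prod.mk.injEq]
    constructor
    · rintro (⟨rfl, rfl, rfl⟩ | ⟨k, h1, h2, h3⟩)
      · exact ⟨0, by simp⟩
      · exact ⟨k + 1, by simpa using h1, by simpa using h2, by simpa using h3⟩
    · rintro ⟨k, h1, h2, h3⟩
      match k with
      | 0 =>
        left
        simp only [List.getElem?_cons_zero, List.getElem?_cons_succ, Option.some.injEq] at h1 h2 h3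
        exact ⟨h1.symm, h2.symm, h3.symm⟩
      | k + 1 =>
        right
        exact ⟨k, by simpa using h1, by simpa using h2, by simpa using h3⟩
  | case2 l h =>
    constructor
    · intro hm
      match l, h with
      | [], _ => exact absurd hm (List.not_mem_nil)
      | [a], _ => exact absurd hm (List.not_mem_nil)
      | [a, b], _ => exact absurd hm (List.not_mem_nil)
      | a :: b :: c :: t, h => exact absurd rfl (h a b c t)
    · rintro ⟨k, h1, h2, h3⟩
      exfalso
      obtain ⟨hk, -⟩ := List.getElem?_eq_some_iff.mp h3
      match l, h with
      | [], _ => simp at hk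
      | [a], _ => simp at hk
      | [a, b], _ => simp at hk
      | a :: b :: c :: t, h => exact h a b c t rfl

-- membership in A's collected pattern list (generic inner shape)
theorem mem_foldl_append_if {α β : Type} (p : α → Bool) (f : α → β) (l : List α)
    (acc : List β) (m : β) :
    m ∈ l.foldl (fun acc x => if p x then acc ++ [f x] else acc) acc ↔
      m ∈ acc ∨ ∃ x ∈ l, p x ∧ m = f x := by
  rw [PySem.List.foldl_append_if]
  simp only [List.mem_append, List.mem_map, List.mem_filter]
  constructor
  · rintro (h | ⟨x, ⟨hx, hp⟩, rfl⟩)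
    · exact Or.inl h
    · exact Or.inr ⟨x, hx, hp, rfl⟩
  · rintro (h | ⟨x, hx, hp, rfl⟩)
    · exact Or.inl h
    · exact Or.inr ⟨x, ⟨hx, hp⟩, rfl⟩

-- membership in B's set accumulation (generic inner shape)
theorem mem_foldl_set_add {α β : Type} [BEq β] [LawfulBEq β] (p : α → Bool) (g : α → β)
    (l : List α) (s : PySem.Set β) (x : β) :
    x ∈ l.foldl (fun s t => if p t then PySem.Set.add s (g t) else s) s ↔
      x ∈ s ∨ ∃ t ∈ l, p t ∧ x = g t := by
  induction l generalizing s with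
  | nil => simp
  | cons a l ih =>
    rw [List.foldl_cons, ih]
    by_cases hp : p a = true
    · simp only [hp, if_true, PySem.Set.mem_add, List.mem_cons]
      constructor
      · rintro ((h | rfl) | ⟨t, ht, hp2, rfl⟩)
        · tauto
        · exact Or.inr ⟨a, Or.inl rfl, hp, rfl⟩
        · exact Or.inr ⟨t, Or.inr ht, hp2, rfl⟩
      · rintro (h | ⟨t, (rfl | ht), hp2, rfl⟩) <;> tauto
    · simp only [hp, if_neg, List.mem_cons]
      constructor
      · rintro (h | ⟨t, ht, hp2, rfl⟩)
        · tauto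
        · exact Or.inr ⟨t, Or.inr ht, hp2, rfl⟩
      · rintro (h | ⟨t, (rfl | ht), hp2, rfl⟩)
        · tauto
        · exact absurd hp2 hp
        · tauto

-- indexed access with a cast index, in bounds
theorem pyGetD_cast_add (l : List Char) (k m : Nat) (h : k + m < l.length) :
    PySem.List.pyGetD l ((k : Int) + (m : Int)) ' ' = l[k + m] := by
  have e : ((k : Int) + (m : Int)) = ((k + m : Nat) : Int) := by push_cast; ring
  rw [e, PySem.List.pyGetD_natCast]
  exact List.getD_eq_getElem l ' ' h

-- A's inner index loop over one hypernet string, characterized by membership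
theorem mem_hypersA_one (l : List Char) (acc : List (List Char)) (m : List Char) :
    m ∈ (PySem.List.pyRange 0 ((l.length : Int) - 2) 1).foldl (fun acc i =>
        if PySem.List.pyGetD l i ' ' == PySem.List.pyGetD l (i + 2) ' ' &&
           PySem.List.pyGetD l i ' ' != PySem.List.pyGetD l (i + 1) ' '
        then acc ++ [[PySem.List.pyGetD l i ' ', PySem.List.pyGetD l (i + 1) ' ',
                      PySem.List.pyGetD l (i + 2) ' ']]
        else acc) acc ↔
      m ∈ acc ∨ ∃ a b : Char, a ≠ b ∧ (a, b, a) ∈ pvTrips l ∧ m = [a, b, a] := by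
  rw [mem_foldl_append_if]
  apply or_congr Iff.rfl
  constructor
  · rintro ⟨i, hi, hp, rfl⟩
    rw [PySem.List.mem_pyRange_one] at hi
    lift i to ℕ using hi.1 with k
    have hk : k + 2 < l.length := by omega
    have e0 : PySem.List.pyGetD l (k : Int) ' ' = l[k] := by
      rw [PySem.List.pyGetD_natCast]; exact List.getD_eq_getElem l ' ' (by omega)
    have e1 := pyGetD_cast_add l k 1 (by omega)
    have e2 := pyGetD_cast_add l k 2 (by omega)
    norm_num at e1 e2
    rw [e0, e1, e2] at hp ⊢
    simp only [Bool.and_eq_true, beq_iff_eq, bne_iff_ne, ne_eq] at hp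
    refine ⟨l[k], l[k + 1], hp.2, ?_, ?_⟩
    · rw [mem_pvTrips_iff_getElem]
      exact ⟨k, List.getElem?_eq_getElem (by omega), List.getElem?_eq_getElem (by omega),
        by rw [List.getElem?_eq_getElem (h := by omega)]; exact congrArg some hp.1.symm⟩
    · rw [hp.1]
  · rintro ⟨a, b, hab, hmem, rfl⟩
    rw [mem_pvTrips_iff_getElem] at hmem
    obtain ⟨k, h1, h2, h3⟩ := hmem
    obtain ⟨hk, -⟩ := List.getElem?_eq_some_iff.mp h3
    have hv1 : l[k] = a := by simpa [List.getElem?_eq_getElem (show k < l.length by omega)] using h1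
    have hv2 : l[k + 1] = b := by simpa [List.getElem?_eq_getElem (show k + 1 < l.length by omega)] using h2
    have hv3 : l[k + 2] = a := by simpa [List.getElem?_eq_getElem hk] using h3
    refine ⟨(k : Int), ?_, ?_, ?_⟩
    · rw [PySem.List.mem_pyRange_one]; omega
    · have e0 : PySem.List.pyGetD l (k : Int) ' ' = l[k] := by
        rw [PySem.List.pyGetD_natCast]; exact List.getD_eq_getElem l ' ' (by omega)
      have e1 := pyGetD_cast_add l k 1 (by omega)
      have e2 := pyGetD_cast_add l k 2 (by omega)
      norm_num at e1 e2
      rw [e0, e1, e2, hv1, hv2, hv3]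
      simp [hab]
    · have e0 : PySem.List.pyGetD l (k : Int) ' ' = l[k] := by
        rw [PySem.List.pyGetD_natCast]; exact List.getD_eq_getElem l ' ' (by omega)
      have e1 := pyGetD_cast_add l k 1 (by omega)
      have e2 := pyGetD_cast_add l k 2 (by omega)
      norm_num at e1 e2
      rw [e0, e1, e2, hv1, hv2, hv3]

-- membership in A's hypers list
theorem mem_hypersA (harr : List String) (m : List Char) :
    m ∈ harr.foldl (fun acc h =>
        let l := h.toList
        (PySem.List.pyRange 0 ((l.length : Int) - 2) 1).foldl (fun acc i =>
          if PySem.List.pyGetD l i ' ' == PySem.List.pyGetD l (i + 2) ' ' &&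
             PySem.List.pyGetD l i ' ' != PySem.List.pyGetD l (i + 1) ' '
          then acc ++ [[PySem.List.pyGetD l i ' ', PySem.List.pyGetD l (i + 1) ' ',
                        PySem.List.pyGetD l (i + 2) ' ']]
          else acc) acc) [] ↔
      ∃ h ∈ harr, ∃ a b : Char, a ≠ b ∧ (a, b, a) ∈ pvTrips h.toList ∧ m = [a, b, a] := by
  have gen : ∀ (hs : List String) (acc : List (List Char)),
      m ∈ hs.foldl (fun acc h =>
        let l := h.toList
        (PySem.List.pyRange 0 ((l.length : Int) - 2) 1).foldl (fun acc i =>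
          if PySem.List.pyGetD l i ' ' == PySem.List.pyGetD l (i + 2) ' ' &&
             PySem.List.pyGetD l i ' ' != PySem.List.pyGetD l (i + 1) ' '
          then acc ++ [[PySem.List.pyGetD l i ' ', PySem.List.pyGetD l (i + 1) ' ',
                        PySem.List.pyGetD l (i + 2) ' ']]
          else acc) acc) acc ↔
      m ∈ acc ∨ ∃ h ∈ hs, ∃ a b : Char, a ≠ b ∧ (a, b, a) ∈ pvTrips h.toList ∧ m = [a, b, a] := by
    intro hs
    induction hs with
    | nil => simp
    | cons h hs ih =>
      intro acc
      rw [List.foldl_cons, ih, mem_hypersA_one]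
      simp only [List.mem_cons]
      constructor
      · rintro ((hm | hex) | ⟨g, hg, hex⟩)
        · tauto
        · exact Or.inr ⟨h, Or.inl rfl, hex⟩
        · exact Or.inr ⟨g, Or.inr hg, hex⟩
      · rintro (hm | ⟨g, (rfl | hg), hex⟩)
        · tauto
        · exact Or.inl (Or.inr hex)
        · exact Or.inr ⟨g, hg, hex⟩
  rw [gen harr []]
  simp

-- membership in B's babs set
theorem mem_babsB (harr : List String) (t : Char × Char × Char) :
    t ∈ harr.foldl (fun s h =>
        (pvTrips h.toList).foldl (fun s t =>
          if t.1 == t.2.2 && t.1 != t.2.1 then PySem.Set.add s (t.2.1, t.1, t.2.1) else s) s)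
        PySem.Set.empty ↔
      ∃ h ∈ harr, ∃ a b : Char, a ≠ b ∧ (a, b, a) ∈ pvTrips h.toList ∧ t = (b, a, b) := by
  have one : ∀ (l : List Char) (s : PySem.Set (Char × Char × Char)),
      t ∈ (pvTrips l).foldl (fun s t =>
          if t.1 == t.2.2 && t.1 != t.2.1 then PySem.Set.add s (t.2.1, t.1, t.2.1) else s) s ↔
        t ∈ s ∨ ∃ a b : Char, a ≠ b ∧ (a, b, a) ∈ pvTrips l ∧ t = (b, a, b) := by
    intro l s
    rw [mem_foldl_set_add]
    apply or_congr Iff.rfl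
    constructor
    · rintro ⟨⟨a, b, c⟩, hmem, hp, rfl⟩
      simp only [Bool.and_eq_true, beq_iff_eq, bne_iff_ne, ne_eq] at hp
      obtain ⟨rfl, hab⟩ := hp
      exact ⟨a, b, hab, hmem, rfl⟩
    · rintro ⟨a, b, hab, hmem, rfl⟩
      exact ⟨(a, b, a), hmem, by simp [hab], rfl⟩
  have gen : ∀ (hs : List String) (s : PySem.Set (Char × Char × Char)),
      t ∈ hs.foldl (fun s h =>
        (pvTrips h.toList).foldl (fun s t =>
          if t.1 == t.2.2 && t.1 != t.2.1 then PySem.Set.add s (t.2.1, t.1, t.2.1) else s) s) s ↔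
      t ∈ s ∨ ∃ h ∈ hs, ∃ a b : Char, a ≠ b ∧ (a, b, a) ∈ pvTrips h.toList ∧ t = (b, a, b) := by
    intro hs
    induction hs with
    | nil => simp
    | cons h hs ih =>
      intro s
      rw [List.foldl_cons, ih, one]
      simp only [List.mem_cons]
      constructor
      · rintro ((hm | hex) | ⟨g, hg, hex⟩)
        · tauto
        · exact Or.inr ⟨h, Or.inl rfl, hex⟩
        · exact Or.inr ⟨g, Or.inr hg, hex⟩
      · rintro (hm | ⟨g, (rfl | hg), hex⟩)
        · tauto
        · exact Or.inl (Or.inr hex)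
        · exact Or.inr ⟨g, hg, hex⟩
  rw [gen harr PySem.Set.empty]
  simp [PySem.Set.empty]

-- per-string: A's inner any over hypers = B's window-membership any over the set
set_option maxHeartbeats 1000000 in
theorem key_any (harr : List String) (u : String) :
    (harr.foldl (fun acc h =>
        let l := h.toList
        (PySem.List.pyRange 0 ((l.length : Int) - 2) 1).foldl (fun acc i =>
          if PySem.List.pyGetD l i ' ' == PySem.List.pyGetD l (i + 2) ' ' &&
             PySem.List.pyGetD l i ' ' != PySem.List.pyGetD l (i + 1) ' '
          then acc ++ [[PySem.List.pyGetD l i ' ', PySem.List.pyGetD l (i + 1) ' ',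
                        PySem.List.pyGetD l (i + 2) ' ']]
          else acc) acc) []).any (fun hyp =>
        PySem.Chars.isIn
          [PySem.List.pyGetD hyp 1 ' ', PySem.List.pyGetD hyp 0 ' ', PySem.List.pyGetD hyp 1 ' ']
          u.toList) =
      (pvTrips u.toList).any (fun t => PySem.Set.contains
        (harr.foldl (fun s h =>
          (pvTrips h.toList).foldl (fun s t =>
            if t.1 == t.2.2 && t.1 != t.2.1 then PySem.Set.add s (t.2.1, t.1, t.2.1) else s) s)
          PySem.Set.empty) t) := by
  rw [Bool.eq_iff_iff]
  simp only [List.any_eq_true]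
  constructor
  · rintro ⟨hyp, hmem, hin⟩
    rw [mem_hypersA] at hmem
    obtain ⟨h, hh, a, b, hab, htr, rfl⟩ := hmem
    have e1 : PySem.List.pyGetD [a, b, a] 1 ' ' = b := rfl
    have e0 : PySem.List.pyGetD [a, b, a] 0 ' ' = a := rfl
    rw [e0, e1, PySem.Chars.isIn_iff_infix, ← mem_pvTrips_iff_infix] at hin
    exact ⟨(b, a, b), hin, by rw [PySem.Set.contains_iff, mem_babsB]; exact ⟨h, hh, a, b, hab, htr, rfl⟩⟩
  · rintro ⟨t, htu, hc⟩
    rw [PySem.Set.contains_iff, mem_babsB] at hc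
    obtain ⟨h, hh, a, b, hab, htr, rfl⟩ := hc
    refine ⟨[a, b, a], ?_, ?_⟩
    · rw [mem_hypersA]; exact ⟨h, hh, a, b, hab, htr, rfl⟩
    · have e1 : PySem.List.pyGetD [a, b, a] 1 ' ' = b := rfl
      have e0 : PySem.List.pyGetD [a, b, a] 0 ' ' = a := rfl
      rw [e0, e1, PySem.Chars.isIn_iff_infix, ← mem_pvTrips_iff_infix]
      exact htu

-- the two search loops agree when their per-string tests agree
theorem search_eq (us : List String) (hypers : List (List Char))
    (babs : PySem.Set (Char × Char × Char))
    (h : ∀ u : String,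
      (hypers.any (fun hyp =>
        PySem.Chars.isIn
          [PySem.List.pyGetD hyp 1 ' ', PySem.List.pyGetD hyp 0 ' ', PySem.List.pyGetD hyp 1 ' ']
          u.toList)) =
      (pvTrips u.toList).any (fun t => PySem.Set.contains babs t)) :
    tutkiSearchA us hypers = tutkiSearchB us babs := by
  induction us with
  | nil => rfl
  | cons u rest ih =>
    rw [tutkiSearchA, tutkiSearchB, h u, ih]

-- ===== VERDICT (by name: the statement is the Claim_ definition above) =====
set_option maxHeartbeats 1000000 in
theorem tutki_spec : Claim_equal_tutki := by
  intro us hs _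
  simp only [Spec_tutki, tutki, tutki_alt]
  exact search_eq us _ _ (fun u => key_any hs u)
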